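-- pv_equiv track=rewrite | github.com/schxo99/coding-test | 프로그래머스/레벨 3/보석쇼핑.py | solution
-- ===== SOURCE A (Python) =====
-- def solution(gems):
--     first = 1
--     last = len(gems)
--     answer = []
--     for i in range(len(gems)):
--         if gems[-1] in gems[:-2]:
--             del gems[-1]
--             last-=1
--
--         else:
--             break
--     for i in range(len(gems)):
--         if gems[0] in gems[1:]:
--             del gems[0]
--             first+=1
--         else:
--             break
--
--     answer.append(first)
--     answer.append(last)
--     return answer
-- ===== SOURCE B (Python) =====
-- def solution(gems):
--     n = len(gems)
--     first_occ = {}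
--     for i, g in enumerate(gems):
--         if g not in first_occ:
--             first_occ[g] = i
--     j = n - 1
--     while j >= 0 and first_occ[gems[j]] <= j - 2:
--         j -= 1
--     last = j + 1
--     del gems[last:]
--     last_occ = {}
--     for i, g in enumerate(gems):
--         last_occ[g] = i
--     k = 0
--     while k < last and last_occ[gems[k]] != k:
--         k += 1
--     del gems[:k]
--     return [k + 1, last]
-- ===== Notes on version B (the rewrite author's own statement) =====
-- stated objective: faster
-- what changed: Replaces A's repeated membership scans over slices with per-element deletion by two precomputed first/last-occurrence dictionaries and a single index scan per side, then one bulk slice deletion per side.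
import Mathlib
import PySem

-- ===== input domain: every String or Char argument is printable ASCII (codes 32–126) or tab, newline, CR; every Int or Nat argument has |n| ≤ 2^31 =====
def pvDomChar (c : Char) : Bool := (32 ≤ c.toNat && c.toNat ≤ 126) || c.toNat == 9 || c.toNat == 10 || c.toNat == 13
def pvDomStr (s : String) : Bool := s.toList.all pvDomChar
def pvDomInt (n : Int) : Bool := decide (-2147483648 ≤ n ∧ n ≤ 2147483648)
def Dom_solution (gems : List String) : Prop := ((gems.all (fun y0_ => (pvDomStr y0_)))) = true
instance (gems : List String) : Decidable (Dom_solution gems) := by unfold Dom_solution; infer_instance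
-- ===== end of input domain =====

-- B trims via first/last-occurrence index maps (one dict pass + one scan per side, O(n))
-- instead of A's repeated `in`-scans over slices with in-place deletion (O(n^2)).
-- Both Pythons mutate `gems` identically (verified); the theorems below are about the return value.

-- ===== PORT A =====
-- A's first loop: `for i in range(len(gems)): if gems[-1] in gems[:-2]: del gems[-1]; last -= 1 else: break`
-- fuel = the range bound, state = (current list, last); break = return.
def solBack : Nat → List String → Int → (List String × Int)
  | 0, g, last => (g, last)
  | fuel+1, g, last =>
    if (PySem.List.pyGet? g (-1)).any (fun x => x ∈ PySem.List.slice g none (some (-2))) then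
      solBack fuel g.dropLast (last - 1)
    else (g, last)

-- A's second loop: `if gems[0] in gems[1:]: del gems[0]; first += 1 else: break`
def solFront : Nat → List String → Int → (List String × Int)
  | 0, g, first => (g, first)
  | fuel+1, g, first =>
    if (PySem.List.pyGet? g 0).any (fun x => x ∈ PySem.List.slice g (some 1) none) then
      solFront fuel g.tail (first + 1)
    else (g, first)

def solution (gems : List String) : List Int :=
  let p := solBack gems.length gems (gems.length : Int)
  let q := solFront p.1.length p.1 1
  [q.2, p.2]

-- ===== PORT B =====
-- first_occ: insert index only for an unseen key (Source B's `if g not in first_occ`).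
def bFirstOcc (gems : List String) : PySem.Dict String Int :=
  (PySem.List.enumerate gems).foldl
    (fun d p => if d.contains p.2 then d else d.insert p.2 p.1) PySem.Dict.empty

-- last_occ: overwriting insert keeps the last index.
def bLastOcc (g : List String) : PySem.Dict String Int :=
  (PySem.List.enumerate g).foldl (fun d p => d.insert p.2 p.1) PySem.Dict.empty

-- Source B's `while j >= 0 and first_occ[gems[j]] <= j - 2: j -= 1` (fuel ≥ iterations; the
-- `.getD 0` default is unreachable: every queried element is a key of the dict).
def bBack (fo : PySem.Dict String Int) (gems : List String) : Nat → Int → Int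
  | 0, j => j
  | fuel+1, j =>
    if 0 ≤ j ∧ ((PySem.List.pyGet? gems j).bind fo.get?).getD 0 ≤ j - 2 then
      bBack fo gems fuel (j - 1)
    else j

-- Source B's `while k < last and last_occ[gems[k]] != k: k += 1` (same fuel convention).
def bFront (lo : PySem.Dict String Int) (g : List String) (last : Int) : Nat → Int → Int
  | 0, k => k
  | fuel+1, k =>
    if k < last ∧ ((PySem.List.pyGet? g k).bind lo.get?).getD 0 ≠ k then
      bFront lo g last fuel (k + 1)
    else k

def solution_alt (gems : List String) : List Int :=
  let n := gems.length
  let fo := bFirstOcc gems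
  let j := bBack fo gems (n + 1) ((n : Int) - 1)
  let last := j + 1
  let g := PySem.List.slice gems none (some last)   -- what `del gems[last:]` leaves
  let lo := bLastOcc g
  let k := bFront lo g last (n + 1) 0
  [k + 1, last]

-- ===== PRECONDITION & SPEC =====
def Spec_solution (gems : List String) (out : List Int) : Prop := out = solution_alt gems
instance (gems : List String) (out : List Int) : Decidable (Spec_solution gems out) := by unfold Spec_solution; infer_instance

-- ===== CLAIM (what is proved, stated in full; the proofs are below) =====
def Claim_equal_solution : Prop := ∀ (gems : List String), Dom_solution gems → Spec_solution gems (solution gems)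

-- ===== LEMMAS AND PROOFS =====

-- last index of x in l (as Int), for x ∈ l
def lIdx (x : String) : List String → Int
  | [] => 0
  | a :: t => if x ∈ t then 1 + lIdx x t else 0

theorem lIdx_nonneg (x : String) (l : List String) : 0 ≤ lIdx x l := by
  induction l with
  | nil => simp [lIdx]
  | cons a t ih => simp only [lIdx]; split <;> omega

theorem mem_take_iff_idxOf (x : String) (l : List String) (m : Nat) :
    x ∈ l.take m ↔ x ∈ l ∧ l.idxOf x < m := by
  induction l generalizing m with
  | nil => simp
  | cons a t ih =>
    cases m with
    | zero => simp
    | succ m =>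
      by_cases hax : a = x
      · subst hax; simp
      · have hbeq : (a == x) = false := beq_eq_false_iff_ne.mpr hax
        simp only [List.take_succ_cons, List.mem_cons, Ne.symm hax, false_or, ih,
          List.idxOf_cons, hbeq, cond_false]
        constructor
        · rintro ⟨h1, h2⟩; exact ⟨h1, by omega⟩
        · rintro ⟨h1, h2⟩; exact ⟨h1, by omega⟩

theorem fo_aux1 (l : List String) : ∀ (s : Int) (d : PySem.Dict String Int) (x : String) (v : Int),
    d.get? x = some v →
    ((PySem.List.enumerate l s).foldl
      (fun d p => if d.contains p.2 then d else d.insert p.2 p.1) d).get? x = some v := by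
  induction l with
  | nil => intro s d x v h; simpa [PySem.List.enumerate] using h
  | cons a t ih =>
    intro s d x v h
    rw [PySem.List.enumerate_cons, List.foldl_cons]
    apply ih
    by_cases hc : d.contains a
    · simpa [hc] using h
    · simp only [hc, if_neg, Bool.false_eq_true, not_false_eq_true, ite_false]
      have hxa : x ≠ a := by
        intro he; subst he
        rw [PySem.Dict.contains_eq_isSome_get?, h] at hc; simp at hc
      rw [PySem.Dict.get?_insert_of_ne _ _ hxa]; exact h

theorem fo_aux2 (l : List String) : ∀ (s : Int) (d : PySem.Dict String Int) (x : String),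
    x ∈ l → d.get? x = none →
    ((PySem.List.enumerate l s).foldl
      (fun d p => if d.contains p.2 then d else d.insert p.2 p.1) d).get? x
      = some (s + (l.idxOf x : Int)) := by
  induction l with
  | nil => intro s d x hx; simp at hx
  | cons a t ih =>
    intro s d x hx h
    rw [PySem.List.enumerate_cons, List.foldl_cons]
    by_cases hxa : x = a
    · subst hxa
      have hc : d.contains x = false := by
        rw [PySem.Dict.contains_eq_isSome_get?, h]; rfl
      simp only [hc, Bool.false_eq_true, ite_false]
      have := fo_aux1 t (s+1) (d.insert x s) x s (PySem.Dict.get?_insert_self d x s)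
      rw [this]
      simp [List.idxOf_cons]
    · have hxt : x ∈ t := by
        rcases List.mem_cons.mp hx with h'|h'; exact absurd h' hxa; exact h'
      have hd' : (if d.contains a then d else d.insert a s).get? x = none := by
        split
        · exact h
        · rw [PySem.Dict.get?_insert_of_ne _ _ hxa]; exact h
      rw [ih (s+1) _ x hxt hd']
      have hbeq : (a == x) = false := beq_eq_false_iff_ne.mpr (Ne.symm hxa)
      simp [List.idxOf_cons, hbeq]
      push_cast
      ring

theorem firstOcc_get (gems : List String) (x : String) (hx : x ∈ gems) :
    (bFirstOcc gems).get? x = some (gems.idxOf x : Int) := by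
  have := fo_aux2 gems 0 PySem.Dict.empty x hx (PySem.Dict.get?_empty x)
  simpa [bFirstOcc] using this

theorem lo_aux1 (l : List String) : ∀ (s : Int) (d : PySem.Dict String Int) (x : String),
    x ∉ l →
    ((PySem.List.enumerate l s).foldl (fun d p => d.insert p.2 p.1) d).get? x = d.get? x := by
  induction l with
  | nil => intro s d x _; simp [PySem.List.enumerate]
  | cons a t ih =>
    intro s d x hx
    rw [PySem.List.enumerate_cons, List.foldl_cons]
    have hxa : x ≠ a := fun he => hx (he ▸ List.mem_cons_self)
    have hxt : x ∉ t := fun ht => hx (List.mem_cons_of_mem a ht)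
    rw [ih (s+1) _ x hxt, PySem.Dict.get?_insert_of_ne _ _ hxa]

theorem lastOcc_aux (l : List String) : ∀ (s : Int) (d : PySem.Dict String Int) (x : String),
    x ∈ l →
    ((PySem.List.enumerate l s).foldl (fun d p => d.insert p.2 p.1) d).get? x
      = some (s + lIdx x l) := by
  induction l with
  | nil => intro s d x hx; simp at hx
  | cons a t ih =>
    intro s d x hx
    rw [PySem.List.enumerate_cons, List.foldl_cons]
    by_cases hxt : x ∈ t
    · rw [ih (s+1) _ x hxt]
      simp only [lIdx, hxt, if_pos]
      congr 1; ring
    · have hxa : x = a := by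
        rcases List.mem_cons.mp hx with h'|h'; exact h'; exact absurd h' hxt
      subst hxa
      rw [lo_aux1 t (s+1) _ x hxt, PySem.Dict.get?_insert_self]
      simp [lIdx, hxt]

theorem lastOcc_get (g : List String) (x : String) (hx : x ∈ g) :
    (bLastOcc g).get? x = some (lIdx x g) := by
  have := lastOcc_aux g 0 PySem.Dict.empty x hx
  simpa [bLastOcc] using this

theorem lIdx_ge_of_mem_drop (x : String) (l : List String) (j : Nat) (h : x ∈ l.drop j) :
    (j : Int) ≤ lIdx x l := by
  induction l generalizing j with
  | nil => simp at h
  | cons a t ih =>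
    cases j with
    | zero => exact lIdx_nonneg x _
    | succ j =>
      simp only [List.drop_succ_cons] at h
      have ht : x ∈ t := List.mem_of_mem_drop h
      have := ih j h
      simp [lIdx, ht]; omega

theorem lIdx_occ (x : String) (l : List String) (hx : x ∈ l) :
    ∃ h : (lIdx x l).toNat < l.length, l[(lIdx x l).toNat] = x := by
  induction l with
  | nil => simp at hx
  | cons a t ih =>
    by_cases ht : x ∈ t
    · obtain ⟨h, hg⟩ := ih ht
      have h0 := lIdx_nonneg x t
      have : (lIdx x (a :: t)).toNat = (lIdx x t).toNat + 1 := by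
        simp [lIdx, ht]; omega
      rw [this]
      exact ⟨by simpa using Nat.succ_lt_succ h, by simpa using hg⟩
    · have hax : x = a := by
        rcases List.mem_cons.mp hx with h|h
        · exact h
        · exact absurd h ht
      have : (lIdx x (a :: t)).toNat = 0 := by simp [lIdx, ht]
      rw [this]; exact ⟨by simp, hax.symm⟩

theorem slice_neg2 (l : List String) :
    PySem.List.slice l none (some (-2)) = l.take (l.length - 2) := by
  simp only [PySem.List.slice, PySem.List.clampIdx]
  norm_num
  split_ifs with h1
  · have h0 : l.length - 2 = 0 := by omega
    simp [h0]
  · omega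

theorem bFront_stop (lo : PySem.Dict String Int) (g : List String) (last : Int) (f : Nat) (k : Int)
    (h : ¬ (k < last ∧ ((PySem.List.pyGet? g k).bind lo.get?).getD 0 ≠ k)) :
    bFront lo g last f k = k := by
  cases f with
  | zero => rfl
  | succ f => simp only [bFront, if_neg h]

theorem bBack_bounds (fo : PySem.Dict String Int) (gems : List String) (f : Nat) (j : Int)
    (h : -1 ≤ j) : -1 ≤ bBack fo gems f j ∧ bBack fo gems f j ≤ j := by
  induction f generalizing j with
  | zero => exact ⟨h, le_refl j⟩
  | succ f ih =>
    simp only [bBack]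
    split_ifs with hc
    · have := ih (j - 1) (by omega)
      omega
    · exact ⟨h, le_refl j⟩

theorem back_eq (gs : List String) : ∀ m : Nat, m ≤ gs.length →
    solBack m (gs.take m) (m : Int) =
      (gs.take (bBack (bFirstOcc gs) gs (m + 1) ((m : Int) - 1) + 1).toNat,
       bBack (bFirstOcc gs) gs (m + 1) ((m : Int) - 1) + 1) := by
  intro m
  induction m with
  | zero => intro _; simp [solBack, bBack]
  | succ m ih =>
    intro hm
    have hlt : m < gs.length := hm
    have hlen : (gs.take (m+1)).length = m+1 := by simp; omega
    have hj : ((m+1 : Nat) : Int) - 1 = ((m : Nat) : Int) := by push_cast; ring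
    have hget : PySem.List.pyGet? (gs.take (m+1)) (-1) = some gs[m] := by
      simp only [PySem.List.pyGet?, PySem.List.pyIdx?, hlen]
      norm_num
    have hslice : PySem.List.slice (gs.take (m+1)) none (some (-2)) = gs.take (m-1) := by
      rw [slice_neg2, hlen, List.take_take]
      congr 1
      omega
    have hgetB : PySem.List.pyGet? gs ((m : Nat) : Int) = some gs[m] := by
      rw [PySem.List.pyGet?_natCast]
      simp [hlt]
    have hfo := firstOcc_get gs gs[m] (List.getElem_mem hlt)
    have hcond : gs[m] ∈ gs.take (m-1) ↔
        (0 ≤ ((m : Nat) : Int) ∧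
          ((PySem.List.pyGet? gs ((m : Nat) : Int)).bind (bFirstOcc gs).get?).getD 0
            ≤ ((m : Nat) : Int) - 2) := by
      rw [hgetB, Option.bind_some, hfo, mem_take_iff_idxOf]
      simp only [Option.getD_some]
      constructor
      · rintro ⟨_, h2⟩
        exact ⟨by positivity, by omega⟩
      · rintro ⟨_, h2⟩
        exact ⟨List.getElem_mem hlt, by omega⟩
    have hdl : (gs.take (m+1)).dropLast = gs.take m := by
      rw [List.dropLast_eq_take, hlen, List.take_take]
      congr 1
      omega
    simp only [solBack, bBack, hj]
    rw [hget, hslice]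
    simp only [Option.any_some, decide_eq_true_eq]
    by_cases hc : gs[m] ∈ gs.take (m-1)
    · rw [if_pos hc, if_pos (hcond.mp hc), hdl]
      have harith : ((m+1 : Nat) : Int) - 1 = (m : Int) := hj
      have := ih (le_of_lt hlt)
      convert this using 3
    · rw [if_neg hc, if_neg (fun h => hc (hcond.mpr h))]
      have ht : (((m : Nat) : Int) + 1).toNat = m + 1 := by omega
      rw [ht]
      simp only [Prod.mk.injEq]
      exact ⟨trivial, by push_cast; ring⟩

theorem front_eq (g : List String) : ∀ f1 f2 k : Nat, k ≤ g.length →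
    g.length - k ≤ f1 → g.length - k ≤ f2 →
    (solFront f1 (g.drop k) ((k : Int) + 1)).2 =
      bFront (bLastOcc g) g (g.length : Int) f2 (k : Int) + 1 := by
  intro f1
  induction f1 with
  | zero =>
    intro f2 k hk h1 h2
    have hke : k = g.length := by omega
    subst hke
    rw [bFront_stop _ _ _ _ _ (by rintro ⟨h, _⟩; omega)]
    rfl
  | succ f1 ih =>
    intro f2 k hk h1 h2
    by_cases hkl : k < g.length
    case neg =>
      have hke : k = g.length := by omega
      subst hke
      rw [bFront_stop _ _ _ _ _ (by rintro ⟨h, _⟩; omega)]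
      simp [solFront, PySem.List.pyGet?, PySem.List.pyIdx?, List.drop_length]
    case pos =>
      have hx : PySem.List.pyGet? (g.drop k) 0 = some g[k] := by
        have h0 : (0 : Int) = ((0 : Nat) : Int) := rfl
        rw [h0, PySem.List.pyGet?_natCast]
        simp [hkl]
      have hsl : PySem.List.slice (g.drop k) (some 1) none = g.drop (k+1) := by
        rw [PySem.List.slice_from _ (by norm_num)]
        simp [List.drop_drop]
      have hgetB : PySem.List.pyGet? g ((k : Nat) : Int) = some g[k] := by
        rw [PySem.List.pyGet?_natCast]
        simp [hkl]
      have hmem : g[k] ∈ g := List.getElem_mem hkl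
      have hlo := lastOcc_get g g[k] hmem
      have hmemdropk : g[k] ∈ g.drop k := by
        have h0 : (g.drop k)[0]'(by simp; omega) = g[k] := by
          simp [List.getElem_drop]
        exact h0 ▸ List.getElem_mem (by simp; omega)
      have hk_le : (k : Int) ≤ lIdx g[k] g := lIdx_ge_of_mem_drop _ _ _ hmemdropk
      have hcond : g[k] ∈ g.drop (k+1) ↔
          ((k : Int) < (g.length : Int) ∧
            ((PySem.List.pyGet? g ((k : Nat) : Int)).bind (bLastOcc g).get?).getD 0
              ≠ ((k : Nat) : Int)) := by
        rw [hgetB, Option.bind_some, hlo]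
        simp only [Option.getD_some]
        constructor
        · intro hmem'
          have := lIdx_ge_of_mem_drop g[k] g (k+1) hmem'
          have hcast : ((k+1 : Nat) : Int) = (k : Int) + 1 := by push_cast; ring
          rw [hcast] at this
          exact ⟨by exact_mod_cast hkl, by omega⟩
        · rintro ⟨_, hne⟩
          obtain ⟨hlt2, hocc⟩ := lIdx_occ g[k] g hmem
          have hge : k + 1 ≤ (lIdx g[k] g).toNat := by omega
          have h3 : g[(lIdx g[k] g).toNat]'hlt2 ∈ g.drop (k+1) := by
            have he : (g.drop (k+1))[(lIdx g[k] g).toNat - (k+1)]'(by simp; omega)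
                = g[(lIdx g[k] g).toNat]'hlt2 := by
              rw [List.getElem_drop]
              congr 1
              omega
            exact he ▸ List.getElem_mem (by simp; omega)
          rwa [hocc] at h3
      simp only [solFront]
      rw [hx, hsl]
      simp only [Option.any_some, decide_eq_true_eq]
      cases f2 with
      | zero => omega
      | succ f2 =>
        simp only [bFront]
        by_cases hc : g[k] ∈ g.drop (k+1)
        · rw [if_pos hc, if_pos (hcond.mp hc)]
          have hrec := ih f2 (k+1) (by omega) (by omega) (by omega)
          have hc1 : ((k+1 : Nat) : Int) = (k : Int) + 1 := by push_cast; ring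
          rw [hc1, ← List.tail_drop] at hrec
          exact hrec
        · rw [if_neg hc, if_neg (fun h => hc (hcond.mpr h))]

-- ===== VERDICT (by name: the statement is the Claim_ definition above) =====
theorem solution_spec : Claim_equal_solution := by
  intro gs _
  unfold Spec_solution
  simp only [solution, solution_alt]
  have hb := back_eq gs gs.length (le_refl _)
  rw [List.take_length] at hb
  rw [hb]
  have hbd := bBack_bounds (bFirstOcc gs) gs (gs.length + 1) ((gs.length : Int) - 1)
    (by omega)
  have hL0 : 0 ≤ bBack (bFirstOcc gs) gs (gs.length + 1) ((gs.length : Int) - 1) + 1 := by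
    omega
  have hLn : bBack (bFirstOcc gs) gs (gs.length + 1) ((gs.length : Int) - 1) + 1
      ≤ (gs.length : Int) := by omega
  have hslice : PySem.List.slice gs none
      (some (bBack (bFirstOcc gs) gs (gs.length + 1) ((gs.length : Int) - 1) + 1)) =
      gs.take (bBack (bFirstOcc gs) gs (gs.length + 1) ((gs.length : Int) - 1) + 1).toNat :=
    PySem.List.slice_to gs hL0
  rw [hslice]
  have hgl : ((gs.take (bBack (bFirstOcc gs) gs (gs.length + 1)
      ((gs.length : Int) - 1) + 1).toNat).length : Int) =
      bBack (bFirstOcc gs) gs (gs.length + 1) ((gs.length : Int) - 1) + 1 := by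
    simp
    omega
  have hf := front_eq (gs.take (bBack (bFirstOcc gs) gs (gs.length + 1)
      ((gs.length : Int) - 1) + 1).toNat) (gs.take (bBack (bFirstOcc gs) gs (gs.length + 1)
      ((gs.length : Int) - 1) + 1).toNat).length (gs.length + 1) 0 (Nat.zero_le _)
    (by omega) (by simp)
  simp only [List.drop_zero, Nat.cast_zero, zero_add] at hf
  rw [hgl] at hf
  rw [hf]
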